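-- pv_equiv track=rewrite | github.com/jorgecontreras/coding-problems | recursion_backtracking/parenthetical_possibilities.py | parenthetical_possibilities
-- ===== SOURCE A (Python) =====
-- def parenthetical_possibilities(s):
--     # base case
--     # if the string is empty, return the only possibility
--     if len(s) == 0:
--         return ['']
--
--     choices, suffix = options(s)
--     output = []
--     for choice in choices:
--         possibilities = parenthetical_possibilities(suffix)
--         output += [choice + p for p in possibilities]
--
--     return output
--
-- def options(s):
--     """
--     helper function that returns all the possibilities of a string,
--     and the suffix which is whatever string found after the closing parenthesis
--     """
--     if s[0] == "(":
--         end = s.index(")")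
--         options = s[1:end]
--         suffix = s[end+1:]
--         return (options, suffix)
--
--     return (s[0], s[1:])
-- ===== SOURCE B (Python) =====
-- def parenthetical_possibilities(s):
--     # Parse the whole string once into a list of choice groups, then build the
--     # product right-to-left, computing each suffix's possibilities exactly once.
--     groups = []
--     i = 0
--     while i < len(s):
--         if s[i] == "(":
--             end = s.index(")", i)
--             groups.append(s[i + 1:end])
--             i = end + 1
--         else:
--             groups.append(s[i])
--             i += 1
--     results = ['']
--     for group in reversed(groups):
--         results = [c + p for c in group for p in results]
--     return results
-- ===== Notes on version B (the rewrite author's own statement) =====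
-- stated objective: faster
-- what changed: B parses the string once into a list of choice groups and builds the product iteratively right-to-left, computing each suffix's possibility list exactly once, instead of A's recursion that re-runs the whole suffix recursion once per choice of every group.
-- outside the precondition, e.g. on parenthetical_possibilities('()('): A returns [], B raises ValueError; on parenthetical_possibilities('(ab'): A raises ValueError, B raises ValueError
import Mathlib
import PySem

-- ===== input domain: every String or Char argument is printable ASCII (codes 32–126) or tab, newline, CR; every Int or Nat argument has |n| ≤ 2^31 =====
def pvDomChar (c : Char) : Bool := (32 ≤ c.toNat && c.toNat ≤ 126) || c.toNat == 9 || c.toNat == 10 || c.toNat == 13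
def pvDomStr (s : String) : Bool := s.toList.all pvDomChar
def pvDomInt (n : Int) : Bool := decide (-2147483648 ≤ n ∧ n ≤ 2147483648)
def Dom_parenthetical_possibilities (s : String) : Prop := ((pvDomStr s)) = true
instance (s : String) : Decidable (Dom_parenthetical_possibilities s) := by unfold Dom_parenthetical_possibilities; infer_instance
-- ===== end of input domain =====

-- B computes each suffix's possibilities once (single parse + right-to-left product)
-- instead of A's recursion that re-runs the suffix recursion once per choice; equivalence
-- is about the return value on Pre_ (where neither Python raises).

-- ===== PORT A =====
-- Python options(s): none = the ValueError raised by s.index(")")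
def pvOptionsA (c : Char) (rest : List Char) : Option (List Char × List Char) :=
  if c = '(' then
    if (rest.takeWhile (· ≠ ')')).length = rest.length then none
    else some (rest.takeWhile (· ≠ ')'), rest.drop ((rest.takeWhile (· ≠ ')')).length + 1))
  else some ([c], rest)

-- A's recursion, with fuel only as a totality guard (the suffix is always strictly
-- shorter, so fuel = length + 1 never runs out); like A, it re-computes the recursion
-- on the suffix once per choice inside the loop.
def pvACore : Nat → List Char → Option (List (List Char))
  | 0, _ => none
  | _ + 1, [] => some [[]]
  | fuel + 1, c :: rest =>
    match pvOptionsA c rest with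
    | none => none
    | some (choices, suffix) =>
      choices.foldl
        (fun acc ch =>
          match acc with
          | none => none
          | some out =>
            match pvACore fuel suffix with
            | none => none
            | some poss => some (out ++ poss.map (ch :: ·)))
        (some [])

def parenthetical_possibilities (s : String) : List String :=
  ((pvACore (s.toList.length + 1) s.toList).map (·.map String.ofList)).getD []

-- ===== PORT B =====
-- B's single parse of the whole string into the list of choice groups (none = ValueError)
def pvParseGroups : List Char → Option (List (List Char))
  | [] => some []
  | c :: rest =>
    if c = '(' then
      if (rest.takeWhile (· ≠ ')')).length = rest.length then none
      else (pvParseGroups (rest.drop ((rest.takeWhile (· ≠ ')')).length + 1))).map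
        (rest.takeWhile (· ≠ ')') :: ·)
    else (pvParseGroups rest).map ([c] :: ·)
termination_by l => l.length
decreasing_by all_goals (simp only [List.length_drop, List.length_cons]; omega)

def parenthetical_possibilities_alt (s : String) : List String :=
  match pvParseGroups s.toList with
  | none => []
  | some groups =>
    (groups.reverse.foldl (fun res g => g.flatMap fun ch => res.map (ch :: ·)) [[]]).map String.ofList

-- ===== PRECONDITION & SPEC =====
-- Pre_ excludes strings containing a '(' with no later ')': there A usually raises
-- ValueError, but can still return [] when an earlier empty '()' group empties the
-- product before the bad '(' is reached, while B, which parses the whole string up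
-- front, raises ValueError on all of them.
def Pre_parenthetical_possibilities (s : String) : Prop :=
  ∀ i ∈ List.range s.toList.length, s.toList.getD i ' ' = '(' → ')' ∈ s.toList.drop (i + 1)
instance (s : String) : Decidable (Pre_parenthetical_possibilities s) := by
  unfold Pre_parenthetical_possibilities; infer_instance
def pvWitness_parenthetical_possibilities : String := "(ab)c(de)"

def Spec_parenthetical_possibilities (s : String) (out : List String) : Prop := out = parenthetical_possibilities_alt s
instance (s : String) (out : List String) : Decidable (Spec_parenthetical_possibilities s out) := by unfold Spec_parenthetical_possibilities; infer_instance

-- ===== CLAIM (what is proved, stated in full; the proofs are below) =====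
def Claim_equal_parenthetical_possibilities : Prop := ∀ (s : String), Dom_parenthetical_possibilities s → Pre_parenthetical_possibilities s → Spec_parenthetical_possibilities s (parenthetical_possibilities s)

-- ===== LEMMAS AND PROOFS =====

-- the right fold that B's reversed loop computes
def pvProd (gs : List (List Char)) : List (List Char) :=
  gs.foldr (fun g res => g.flatMap fun ch => res.map (ch :: ·)) [[]]

theorem pvAlt_eq (s : String) :
    parenthetical_possibilities_alt s =
      match pvParseGroups s.toList with
      | none => []
      | some gs => (pvProd gs).map String.ofList := by
  unfold parenthetical_possibilities_alt pvProd
  cases pvParseGroups s.toList with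
  | none => rfl
  | some gs => simp [List.foldl_reverse]

-- list-level precondition
def pvPreL (l : List Char) : Prop :=
  ∀ i ∈ List.range l.length, l.getD i ' ' = '(' → ')' ∈ l.drop (i + 1)

theorem pvPreL_drop {l : List Char} (h : pvPreL l) (n : Nat) : pvPreL (l.drop n) := by
  intro i hi hget
  simp only [List.mem_range, List.length_drop] at hi
  have hni : n + i < l.length := by omega
  have hgd : (l.drop n).getD i ' ' = l.getD (n + i) ' ' := by
    rw [List.getD_eq_getElem _ _ (by simp; omega), List.getD_eq_getElem _ _ hni]
    simp
  rw [hgd] at hget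
  have hmem := h (n + i) (by simp [hni]) hget
  rw [List.drop_drop]
  have e : n + (i + 1) = n + i + 1 := by omega
  rw [e]
  exact hmem

theorem pvTakeWhile_lt {rest : List Char} (h : ')' ∈ rest) :
    (rest.takeWhile (· ≠ ')')).length < rest.length := by
  induction rest with
  | nil => simp at h
  | cons c cs ih =>
    by_cases hc : c = ')'
    · subst hc; simp [List.takeWhile]
    · have hcs : ')' ∈ cs := by
        rcases List.mem_cons.mp h with h' | h'
        · exact absurd h'.symm hc
        · exact h'
      simp only [List.takeWhile_cons, List.length_cons]
      rw [if_pos (show decide (c ≠ ')') = true by simp [hc])]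
      simpa using Nat.succ_lt_succ (ih hcs)

theorem pvParse_some (n : Nat) (l : List Char) (hn : l.length ≤ n) (h : pvPreL l) :
    ∃ gs, pvParseGroups l = some gs := by
  induction n generalizing l with
  | zero =>
    have : l = [] := by cases l <;> simp_all
    exact ⟨[], by rw [this]; unfold pvParseGroups; rfl⟩
  | succ n ih =>
    cases l with
    | nil => exact ⟨[], by unfold pvParseGroups; rfl⟩
    | cons c rest =>
      by_cases hc : c = '('
      · have hmem : ')' ∈ rest := by
          have := h 0 (by simp) (by simp [hc])
          simpa using this
        have hlt := pvTakeWhile_lt hmem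
        have hlen : ¬ (rest.takeWhile (· ≠ ')')).length = rest.length := by omega
        have hpre : pvPreL (rest.drop ((rest.takeWhile (· ≠ ')')).length + 1)) := by
          have e : rest.drop ((rest.takeWhile (· ≠ ')')).length + 1)
              = (c :: rest).drop ((rest.takeWhile (· ≠ ')')).length + 2) := by simp
          rw [e]; exact pvPreL_drop h _
        obtain ⟨gs, hgs⟩ := ih _ (by simp at hn ⊢; omega) hpre
        refine ⟨rest.takeWhile (· ≠ ')') :: gs, ?_⟩
        unfold pvParseGroups
        rw [if_pos hc, if_neg hlen, hgs]
        rfl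
      · have hpre : pvPreL rest := by
          have e : rest = (c :: rest).drop 1 := rfl
          rw [e]; exact pvPreL_drop h 1
        obtain ⟨gs, hgs⟩ := ih _ (by simp at hn ⊢; omega) hpre
        refine ⟨[c] :: gs, ?_⟩
        unfold pvParseGroups
        rw [if_neg hc, hgs]
        rfl

theorem pvFold_gen (f : Option (List (List Char)) → Char → Option (List (List Char)))
    (P : List (List Char))
    (hf : ∀ out ch, f (some out) ch = some (out ++ P.map (ch :: ·)))
    (cs : List Char) (acc : List (List Char)) :
    cs.foldl f (some acc) = some (acc ++ cs.flatMap fun ch => P.map (ch :: ·)) := by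
  induction cs generalizing acc with
  | nil => simp
  | cons ch cs ih =>
    rw [List.foldl_cons, hf, ih]
    simp

theorem pvCore_parse (fuel : Nat) (l : List Char) (gs : List (List Char))
    (hfuel : l.length < fuel) (hparse : pvParseGroups l = some gs) :
    pvACore fuel l = some (pvProd gs) := by
  induction fuel generalizing l gs with
  | zero => omega
  | succ fuel ih =>
    cases l with
    | nil =>
      unfold pvParseGroups at hparse
      cases hparse
      rfl
    | cons c rest =>
      by_cases hc : c = '('
      · by_cases hlen : (rest.takeWhile (· ≠ ')')).length = rest.length
        · unfold pvParseGroups at hparse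
          rw [if_pos hc, if_pos hlen] at hparse
          exact absurd hparse (by simp)
        · unfold pvParseGroups at hparse
          rw [if_pos hc, if_neg hlen] at hparse
          rw [Option.map_eq_some_iff] at hparse
          obtain ⟨gs', hgs', rfl⟩ := hparse
          have hsuf : (rest.drop ((rest.takeWhile (· ≠ ')')).length + 1)).length < fuel := by
            simp only [List.length_cons] at hfuel
            simp only [List.length_drop]
            omega
          have hIH := ih _ _ hsuf hgs'
          show (match pvOptionsA c rest with
            | none => none
            | some (choices, suffix) =>
              choices.foldl
                (fun acc ch =>
                  match acc with
                  | none => none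
                  | some out =>
                    match pvACore fuel suffix with
                    | none => none
                    | some poss => some (out ++ poss.map (ch :: ·)))
                (some [])) = _
          unfold pvOptionsA
          rw [if_pos hc, if_neg hlen]
          simp only []
          rw [pvFold_gen _ (pvProd gs') (fun out ch => by rw [hIH])]
          simp [pvProd]
      · unfold pvParseGroups at hparse
        rw [if_neg hc, Option.map_eq_some_iff] at hparse
        obtain ⟨gs', hgs', rfl⟩ := hparse
        have hIH := ih _ _ (by simp at hfuel ⊢; omega) hgs'
        show (match pvOptionsA c rest with
          | none => none
          | some (choices, suffix) =>
            choices.foldl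
              (fun acc ch =>
                match acc with
                | none => none
                | some out =>
                  match pvACore fuel suffix with
                  | none => none
                  | some poss => some (out ++ poss.map (ch :: ·)))
              (some [])) = _
        unfold pvOptionsA
        rw [if_neg hc]
        simp only []
        rw [pvFold_gen _ (pvProd gs') (fun out ch => by rw [hIH])]
        simp [pvProd]

-- ===== VERDICT (by name: the statement is the Claim_ definition above) =====
theorem parenthetical_possibilities_spec : Claim_equal_parenthetical_possibilities := by
  intro s _ hpre
  unfold Spec_parenthetical_possibilities
  obtain ⟨gs, hgs⟩ := pvParse_some s.toList.length s.toList (le_refl _) hpre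
  have hcore := pvCore_parse (s.toList.length + 1) s.toList gs (by omega) hgs
  rw [pvAlt_eq, hgs]
  unfold parenthetical_possibilities
  rw [hcore]
  simp
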